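-- pv_equiv track=rewrite | github.com/shasank0001/Blast-radius | blast_radius/blast_radius_mcp/tools/tool1_ast_engine.py | _compose_alias_view
-- ===== SOURCE A (Python) =====
-- def _compose_alias_view(
--     scope_id: str,
--     alias_maps_by_scope: dict[str, dict[str, tuple[str, str]]],
--     parent_by_scope: dict[str, str | None],
--     kind_by_scope: dict[str, str],
-- ) -> dict[str, tuple[str, str]]:
--     """Compose visible aliases for a scope by walking parent links."""
--     if not scope_id:
--         return {}
--
--     current_scope_id = scope_id
--     if current_scope_id not in parent_by_scope:
--         module_ids = [sid for sid, parent in parent_by_scope.items() if parent is None]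
--         if module_ids:
--             current_scope_id = module_ids[0]
--         else:
--             return {}
--
--     chain: list[str] = []
--     seen: set[str] = set()
--     cur: str | None = current_scope_id
--     while cur is not None and cur not in seen:
--         seen.add(cur)
--         chain.append(cur)
--         cur = parent_by_scope.get(cur)
--
--     current_kind = kind_by_scope.get(current_scope_id, "")
--     skip_class_ancestors = current_kind in {"function", "method"}
--
--     merged: dict[str, tuple[str, str]] = {}
--     for sid in reversed(chain):
--         if skip_class_ancestors and sid != current_scope_id and kind_by_scope.get(sid) == "class":
--             continue
--         merged.update(alias_maps_by_scope.get(sid, {}))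
--
--     return merged
-- ===== SOURCE B (Python) =====
-- def _compose_alias_view(
--     scope_id: str,
--     alias_maps_by_scope: dict[str, dict[str, tuple[str, str]]],
--     parent_by_scope: dict[str, str | None],
--     kind_by_scope: dict[str, str],
-- ) -> dict[str, tuple[str, str]]:
--     """Compose visible aliases by structural recursion on the parent chain.
--
--     No chain list and no reversed() second pass: a recursive helper walks
--     leaf-to-root, obtains the ancestors' merged view from the recursive call
--     (root-most bindings first), and overlays the current scope's aliases on
--     top of it, so the nearest scope's binding wins exactly as in the
--     sequential root-to-leaf updates.
--     """
--     if not scope_id: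
--         return {}
--
--     if scope_id in parent_by_scope:
--         start = scope_id
--     else:
--         start = next((sid for sid, p in parent_by_scope.items() if p is None), None)
--         if start is None:
--             return {}
--
--     skip = kind_by_scope.get(start, "") in ("function", "method")
--
--     def visible(cur: str | None, seen: frozenset) -> dict:
--         if cur is None or cur in seen:
--             return {}
--         acc = visible(parent_by_scope.get(cur), seen | {cur})
--         if not (skip and cur != start and kind_by_scope.get(cur) == "class"):
--             acc.update(alias_maps_by_scope.get(cur, {}))
--         return acc
--
--     return visible(start, frozenset())
-- ===== Notes on version B (the rewrite author's own statement) =====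
-- stated objective: simpler
-- what changed: Replaces A's two-stage iterative scheme (collect the scope chain into a list, then merge it in a reversed() second pass) by one recursive helper that walks leaf-to-root and overlays each kept scope's aliases on the merged view returned by the recursive call, so no chain list and no reversal exist.
import Mathlib
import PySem

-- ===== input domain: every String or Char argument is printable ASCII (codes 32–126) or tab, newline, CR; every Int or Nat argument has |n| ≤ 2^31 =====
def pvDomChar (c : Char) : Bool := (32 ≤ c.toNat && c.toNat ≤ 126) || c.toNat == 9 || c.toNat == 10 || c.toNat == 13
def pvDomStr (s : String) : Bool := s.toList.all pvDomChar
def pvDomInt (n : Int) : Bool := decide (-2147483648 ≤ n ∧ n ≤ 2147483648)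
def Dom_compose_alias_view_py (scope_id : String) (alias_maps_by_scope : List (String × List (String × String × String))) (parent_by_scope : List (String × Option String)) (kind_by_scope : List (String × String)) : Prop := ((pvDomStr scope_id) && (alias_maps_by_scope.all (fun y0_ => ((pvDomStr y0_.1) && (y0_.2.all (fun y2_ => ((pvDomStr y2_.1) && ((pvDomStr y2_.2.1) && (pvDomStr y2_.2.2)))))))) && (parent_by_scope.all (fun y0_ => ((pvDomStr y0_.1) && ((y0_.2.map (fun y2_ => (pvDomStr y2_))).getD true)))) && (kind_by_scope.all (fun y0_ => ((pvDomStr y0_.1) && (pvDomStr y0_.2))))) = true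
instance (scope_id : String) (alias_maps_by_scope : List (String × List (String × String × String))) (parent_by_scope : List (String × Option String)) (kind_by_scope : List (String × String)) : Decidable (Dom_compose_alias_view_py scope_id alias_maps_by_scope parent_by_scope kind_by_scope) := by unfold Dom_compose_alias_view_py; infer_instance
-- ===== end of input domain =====

-- ===== PORT A =====
-- B replaces A's chain-list + reversed merge pass by one recursive leaf-to-root walk that overlays each kept
-- scope's aliases on the ancestors' merged view (objective: simpler, same cost).
-- A's while loop collecting the scope chain; fuel only makes the cycle-guarded walk total (the seen-set guard
-- stops within |parent| + 1 steps, so fuel = parent.size + 2 is never exhausted).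
def pvChainA (parent : PySem.Dict String (Option String)) : Option String -> PySem.Set String -> Nat -> List String
  | _, _, 0 => []
  | none, _, _ => []
  | some cur, seen, fuel+1 =>
    if PySem.Set.contains seen cur then []
    else cur :: pvChainA parent (PySem.Dict.getD parent cur none) (PySem.Set.add seen cur) fuel

def compose_alias_view_py (scope_id : String) (alias_maps_by_scope : List (String × List (String × String × String))) (parent_by_scope : List (String × Option String)) (kind_by_scope : List (String × String)) : List (String × String × String) :=
  if scope_id = "" then []
  else
    let amaps : PySem.Dict String (PySem.Dict String (String × String)) :=
      PySem.Dict.ofList (alias_maps_by_scope.map (fun p => (p.1, PySem.Dict.ofList p.2)))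
    let parent : PySem.Dict String (Option String) := PySem.Dict.ofList parent_by_scope
    let kinds : PySem.Dict String String := PySem.Dict.ofList kind_by_scope
    let start? : Option String :=
      if parent.contains scope_id then some scope_id
      else
        let module_ids := (parent.items.filter (fun p => p.2 == none)).map (fun p => p.1)
        match module_ids with
        | [] => none
        | m :: _ => some m
    match start? with
    | none => []
    | some current_scope_id =>
      let chain := pvChainA parent (some current_scope_id) PySem.Set.empty (parent.size + 2)
      let current_kind := kinds.getD current_scope_id ""
      let skip_class_ancestors := current_kind == "function" || current_kind == "method"
      let merged := chain.reverse.foldl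
        (fun m sid =>
          if skip_class_ancestors && !(sid == current_scope_id) && (PySem.Dict.get? kinds sid == some "class") then m
          else PySem.Dict.update m (PySem.Dict.getD amaps sid PySem.Dict.empty).items)
        PySem.Dict.empty
      merged.items

-- ===== PORT B =====
-- B's recursive helper `visible`: the merged view of the ancestors comes back from the recursive call and the
-- current scope's aliases (when kept) are overlaid on top of it; fuel as in pvChainA (never exhausted).
def pvVisibleB (parent : PySem.Dict String (Option String)) (amaps : PySem.Dict String (PySem.Dict String (String × String))) (kinds : PySem.Dict String String) (start : String) (skip : Bool) : Option String -> PySem.Set String -> Nat -> PySem.Dict String (String × String)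
  | _, _, 0 => PySem.Dict.empty
  | none, _, _ => PySem.Dict.empty
  | some cur, seen, fuel+1 =>
    if PySem.Set.contains seen cur then PySem.Dict.empty
    else
      let acc := pvVisibleB parent amaps kinds start skip (PySem.Dict.getD parent cur none) (PySem.Set.add seen cur) fuel
      if skip && !(cur == start) && (PySem.Dict.get? kinds cur == some "class") then acc
      else PySem.Dict.update acc (PySem.Dict.getD amaps cur PySem.Dict.empty).items

def compose_alias_view_py_alt (scope_id : String) (alias_maps_by_scope : List (String × List (String × String × String))) (parent_by_scope : List (String × Option String)) (kind_by_scope : List (String × String)) : List (String × String × String) :=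
  if scope_id = "" then []
  else
    let parent : PySem.Dict String (Option String) := PySem.Dict.ofList parent_by_scope
    match (if (PySem.Dict.get? parent scope_id).isSome then some scope_id
           else (parent.items.find? (fun p => p.2 == none)).map Prod.fst) with
    | none => []
    | some start =>
      let kinds : PySem.Dict String String := PySem.Dict.ofList kind_by_scope
      let amaps : PySem.Dict String (PySem.Dict String (String × String)) :=
        PySem.Dict.ofList (alias_maps_by_scope.map (fun p => (p.1, PySem.Dict.ofList p.2)))
      let skip := ["function", "method"].contains (kinds.getD start "")
      (pvVisibleB parent amaps kinds start skip (some start) PySem.Set.empty (parent.size + 2)).items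

-- ===== PRECONDITION & SPEC =====
def Spec_compose_alias_view_py (scope_id : String) (alias_maps_by_scope : List (String × List (String × String × String))) (parent_by_scope : List (String × Option String)) (kind_by_scope : List (String × String)) (out : List (String × String × String)) : Prop := out = compose_alias_view_py_alt scope_id alias_maps_by_scope parent_by_scope kind_by_scope
instance (scope_id : String) (alias_maps_by_scope : List (String × List (String × String × String))) (parent_by_scope : List (String × Option String)) (kind_by_scope : List (String × String)) (out : List (String × String × String)) : Decidable (Spec_compose_alias_view_py scope_id alias_maps_by_scope parent_by_scope kind_by_scope out) := by unfold Spec_compose_alias_view_py; infer_instance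

-- ===== CLAIM (what is proved, stated in full; the proofs are below) =====
def Claim_equal_compose_alias_view_py : Prop := ∀ (scope_id : String) (alias_maps_by_scope : List (String × List (String × String × String))) (parent_by_scope : List (String × Option String)) (kind_by_scope : List (String × String)), Dom_compose_alias_view_py scope_id alias_maps_by_scope parent_by_scope kind_by_scope → Spec_compose_alias_view_py scope_id alias_maps_by_scope parent_by_scope kind_by_scope (compose_alias_view_py scope_id alias_maps_by_scope parent_by_scope kind_by_scope)

-- ===== LEMMAS AND PROOFS =====

-- A's reversed merge over the collected chain equals B's recursive overlay, fuel for fuel.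
theorem pvMergeEq (parent : PySem.Dict String (Option String)) (amaps : PySem.Dict String (PySem.Dict String (String × String))) (kinds : PySem.Dict String String) (start : String) (skip : Bool) :
    ∀ (fuel : Nat) (cur : Option String) (seen : PySem.Set String),
      (pvChainA parent cur seen fuel).reverse.foldl
        (fun m sid =>
          if skip && !(sid == start) && (PySem.Dict.get? kinds sid == some "class") then m
          else PySem.Dict.update m (PySem.Dict.getD amaps sid PySem.Dict.empty).items) PySem.Dict.empty
      = pvVisibleB parent amaps kinds start skip cur seen fuel := by
  intro fuel
  induction fuel with
  | zero => intro cur seen; cases cur <;> simp [pvChainA, pvVisibleB]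
  | succ n ih =>
    intro cur seen
    cases cur with
    | none => simp [pvChainA, pvVisibleB]
    | some c =>
      simp only [pvChainA, pvVisibleB]
      by_cases hs : PySem.Set.contains seen c = true
      · rw [if_pos hs, if_pos hs]; simp
      · rw [if_neg hs, if_neg hs]
        simp only [List.reverse_cons, List.foldl_append, List.foldl_cons, List.foldl_nil]
        rw [ih]

-- A's filter-then-head module fallback equals B's find?.
theorem pvHeadFilterEq (l : List (String × Option String)) :
    (match (l.filter (fun p => p.2 == none)).map (fun p => p.1) with
      | [] => (none : Option String)
      | m :: _ => some m)
    = (l.find? (fun p => p.2 == none)).map Prod.fst := by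
  induction l with
  | nil => rfl
  | cons h t ih =>
    by_cases hp : (h.2 == none) = true
    · have hp' : h.2 = none := by simpa using hp
      simp [List.find?, hp']
    · simp only [List.filter_cons, List.find?, hp]
      simpa using ih

-- ===== VERDICT (by name: the statement is the Claim_ definition above) =====
theorem compose_alias_view_py_spec : Claim_equal_compose_alias_view_py := by
  intro scope_id alias_maps_by_scope parent_by_scope kind_by_scope _
  unfold Spec_compose_alias_view_py
  unfold compose_alias_view_py compose_alias_view_py_alt
  by_cases h : scope_id = ""
  · simp [h]
  · simp only [h, if_false]
    rw [show ((PySem.Dict.ofList parent_by_scope).contains scope_id)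
          = ((PySem.Dict.get? (PySem.Dict.ofList parent_by_scope) scope_id).isSome)
        from PySem.Dict.contains_eq_isSome_get? _ _,
      pvHeadFilterEq]
    cases hs : (if ((PySem.Dict.get? (PySem.Dict.ofList parent_by_scope) scope_id).isSome) then some scope_id
      else ((PySem.Dict.ofList parent_by_scope).items.find? (fun p => p.2 == none)).map Prod.fst) with
    | none => simp
    | some start =>
      dsimp only
      rw [pvMergeEq]
      have hskip : ∀ (k : String), (k == "function" || k == "method")
          = (["function", "method"].contains k) := by
        intro k
        simp only [List.contains, List.elem]
        cases hk1 : k == "function" <;> cases hk2 : k == "method" <;> simp [hk1, hk2]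
      rw [hskip]
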